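-- pv_equiv track=rewrite | github.com/pierrebrd/Advent_of_Code | 2024/D07/1.py | reccursive_calc
-- ===== SOURCE A (Python) =====
-- def reccursive_calc(before, after, wanted, operators):
--     if after == []:  # End of recursivity
--         return (before, operators)  #
--     else:
--         temp = before + after[0]
--         if temp <= wanted:
--             result_plus, operators_plus = reccursive_calc(
--                 temp, after[1:], wanted, operators + ["+"]
--             )
--             if result_plus == wanted:
--                 return (result_plus, operators_plus)
--         # We didn't get good results with +, let's try with *
--         temp = before * after[0]
--         if temp <= wanted:
--             result_mult, operators_mult = reccursive_calc(
--                 temp, after[1:], wanted, operators + ["*"]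
--             )
--             if result_mult == wanted:
--                 return (result_mult, operators_mult)
--         # If we arrive here, the equation can't be fixed.
--         return (None, [])
-- ===== SOURCE B (Python) =====
-- def reccursive_calc(before, after, wanted, operators):
--     if after == []:
--         return (before, operators)
--     # iterative depth-first search with an explicit stack; '*' is pushed
--     # before '+' so the LIFO order explores '+' first, like the recursion
--     stack = [(before, after, operators)]
--     while stack:
--         cur, rem, ops = stack.pop()
--         if not rem:
--             if cur == wanted:
--                 return (cur, ops)
--             continue
--         x, rest = rem[0], rem[1:]
--         m = cur * x
--         if m <= wanted:
--             stack.append((m, rest, ops + ["*"]))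
--         p = cur + x
--         if p <= wanted:
--             stack.append((p, rest, ops + ["+"]))
--     return (None, [])
-- ===== Notes on version B (the rewrite author's own statement) =====
-- stated objective: alternative
-- what changed: Replaces the nested-return recursion with an iterative depth-first search over an explicit stack of (value, remaining, operators) states, pushing the '*' continuation before the '+' one so the LIFO order reproduces the '+'-first preference.
import Mathlib
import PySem

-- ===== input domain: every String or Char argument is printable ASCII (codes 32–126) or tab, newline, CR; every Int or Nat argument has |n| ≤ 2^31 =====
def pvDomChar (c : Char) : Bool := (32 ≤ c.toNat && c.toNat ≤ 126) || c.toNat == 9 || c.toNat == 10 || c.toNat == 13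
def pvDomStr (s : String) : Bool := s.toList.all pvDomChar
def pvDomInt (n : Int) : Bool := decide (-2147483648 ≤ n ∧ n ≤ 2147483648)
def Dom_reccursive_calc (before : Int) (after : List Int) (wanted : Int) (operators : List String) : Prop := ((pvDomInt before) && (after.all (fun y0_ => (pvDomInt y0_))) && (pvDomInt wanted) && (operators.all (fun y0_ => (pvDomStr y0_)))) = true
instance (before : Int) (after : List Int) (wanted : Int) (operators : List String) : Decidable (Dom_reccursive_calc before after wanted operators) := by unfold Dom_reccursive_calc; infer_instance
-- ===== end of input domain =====

-- B replaces A's recursion by an iterative explicit-stack depth-first search (same pruning, same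
-- '+'-before-'*' order via LIFO push order); objective: alternative decomposition, same cost.

-- ===== PORT A =====
-- Literal port of A's recursion; the code after the '+' block ("try '*', else fail")
-- is the fall-through continuation `tryMult`.
def reccursive_calc (before : Int) (after : List Int) (wanted : Int) (operators : List String) : Option Int × List String :=
  match after with
  | [] => (some before, operators)
  | x :: rest =>
    let tryMult : Option Int × List String :=
      if before * x ≤ wanted then
        let rm := reccursive_calc (before * x) rest wanted (operators ++ ["*"])
        if rm.1 = some wanted then rm else (none, [])
      else (none, [])
    if before + x ≤ wanted then
      let rp := reccursive_calc (before + x) rest wanted (operators ++ ["+"])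
      if rp.1 = some wanted then rp else tryMult
    else tryMult

-- ===== PORT B =====
-- termination measure for the stack loop: each popped state of weight 3^(n+1)
-- is replaced by at most two states of weight 3^n
def pvMeasure (stk : List (Int × List Int × List String)) : Nat :=
  (stk.map fun s => 3 ^ s.2.1.length).sum

-- the `while stack:` loop of Source B
def pvLoop (wanted : Int) (stk : List (Int × List Int × List String)) : Option Int × List String :=
  match stk with
  | [] => (none, [])
  | (cur, rem, ops) :: stk' =>
    match rem with
    | [] => if cur = wanted then (some cur, ops) else pvLoop wanted stk'
    | x :: rest =>
      let stk1 := if cur * x ≤ wanted then (cur * x, rest, ops ++ ["*"]) :: stk' else stk'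
      let stk2 := if cur + x ≤ wanted then (cur + x, rest, ops ++ ["+"]) :: stk1 else stk1
      pvLoop wanted stk2
termination_by pvMeasure stk
decreasing_by
  · simp [pvMeasure]
  · have h : 0 < 3 ^ rest.length := by positivity
    split_ifs <;> simp [pvMeasure, pow_succ] <;> omega


def reccursive_calc_alt (before : Int) (after : List Int) (wanted : Int) (operators : List String) : Option Int × List String :=
  if after = [] then (some before, operators)
  else pvLoop wanted [(before, after, operators)]

-- ===== PRECONDITION & SPEC =====
def Spec_reccursive_calc (before : Int) (after : List Int) (wanted : Int) (operators : List String) (out : Option Int × List String) : Prop := out = reccursive_calc_alt before after wanted operators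
instance (before : Int) (after : List Int) (wanted : Int) (operators : List String) (out : Option Int × List String) : Decidable (Spec_reccursive_calc before after wanted operators out) := by unfold Spec_reccursive_calc; infer_instance

-- ===== CLAIM (what is proved, stated in full; the proofs are below) =====
def Claim_equal_reccursive_calc : Prop := ∀ (before : Int) (after : List Int) (wanted : Int) (operators : List String), Dom_reccursive_calc before after wanted operators → Spec_reccursive_calc before after wanted operators (reccursive_calc before after wanted operators)

-- ===== LEMMAS AND PROOFS =====

-- processing one state on the stack = run A's recursion from that state; keep its
-- result iff it hits `wanted`, otherwise continue with the rest of the stack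
theorem pvLoop_cons (wanted : Int) : ∀ (rem : List Int) (b : Int) (ops : List String)
    (stk : List (Int × List Int × List String)),
    pvLoop wanted ((b, rem, ops) :: stk) =
      if (reccursive_calc b rem wanted ops).1 = some wanted
      then reccursive_calc b rem wanted ops
      else pvLoop wanted stk := by
  intro rem
  induction rem with
  | nil =>
    intro b ops stk
    by_cases h : b = wanted <;> simp [pvLoop, reccursive_calc, h]
  | cons x rest ih =>
    intro b ops stk
    rw [pvLoop]
    by_cases hp : b + x ≤ wanted <;> by_cases hm : b * x ≤ wanted <;>
      simp only [hp, hm, if_pos, if_neg, not_false_iff] <;>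
      rw [reccursive_calc] <;>
      simp only [hp, hm, ite_true, ite_false]
    · rw [ih, ih]
      by_cases h1 : (reccursive_calc (b + x) rest wanted (ops ++ ["+"])).1 = some wanted <;>
        by_cases h2 : (reccursive_calc (b * x) rest wanted (ops ++ ["*"])).1 = some wanted <;>
        simp [h1, h2]
    · rw [ih]
      by_cases h1 : (reccursive_calc (b + x) rest wanted (ops ++ ["+"])).1 = some wanted <;>
        simp [h1]
    · rw [ih]
      by_cases h2 : (reccursive_calc (b * x) rest wanted (ops ++ ["*"])).1 = some wanted <;>
        simp [h2]
    · simp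

-- on a nonempty list, A either succeeds (first component = some wanted) or returns (none, [])
theorem recA_fail (wanted b : Int) (x : Int) (rest : List Int) (ops : List String) :
    (reccursive_calc b (x :: rest) wanted ops).1 = some wanted ∨
      reccursive_calc b (x :: rest) wanted ops = (none, []) := by
  rw [reccursive_calc]
  by_cases h1 : (reccursive_calc (b + x) rest wanted (ops ++ ["+"])).1 = some wanted <;>
    by_cases h2 : (reccursive_calc (b * x) rest wanted (ops ++ ["*"])).1 = some wanted <;>
    split_ifs <;> simp_all

-- ===== VERDICT (by name: the statement is the Claim_ definition above) =====
theorem reccursive_calc_spec : Claim_equal_reccursive_calc := by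
  unfold Claim_equal_reccursive_calc Spec_reccursive_calc
  intro before after wanted operators _
  cases after with
  | nil => simp [reccursive_calc, reccursive_calc_alt]
  | cons x rest =>
    rw [reccursive_calc_alt, if_neg (by simp), pvLoop_cons]
    rcases recA_fail wanted before x rest operators with h | h
    · simp [h]
    · simp [h, pvLoop]
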